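-- pv_equiv track=rewrite | github.com/Wildbush76/AllTheProgramming | AllTheProgramming/Python/wordSearch.py | search_in_direction
-- ===== SOURCE A (Python) =====
-- board = []
--
-- def search_in_direction(x,y,direction,word,index,solution,board):
--     if index == len(word):
--         return True
--     if board[y][x] == word[index]:
--         solution.append([x,y])
--         if search_in_direction(x+direction[0],y+direction[1],direction,word,index+1,solution,board):
--             return True
--         else:
--             return False
--     else:
--         return False
-- ===== SOURCE B (Python) =====
-- def search_in_direction(x, y, direction, word, index, solution, board):
--     for i in range(index, len(word)):
--         if board[y][x] != word[i]:
--             return False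
--         solution.append([x, y])
--         x += direction[0]
--         y += direction[1]
--     return True
-- ===== Notes on version B (the rewrite author's own statement) =====
-- stated objective: simpler
-- what changed: A's boolean-plumbed recursion (recursing on index with an if-True-else-False wrapper) is replaced by a single for-loop over range(index, len(word)), the exact list of character positions the recursion walks, with early return on mismatch.
import Mathlib
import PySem

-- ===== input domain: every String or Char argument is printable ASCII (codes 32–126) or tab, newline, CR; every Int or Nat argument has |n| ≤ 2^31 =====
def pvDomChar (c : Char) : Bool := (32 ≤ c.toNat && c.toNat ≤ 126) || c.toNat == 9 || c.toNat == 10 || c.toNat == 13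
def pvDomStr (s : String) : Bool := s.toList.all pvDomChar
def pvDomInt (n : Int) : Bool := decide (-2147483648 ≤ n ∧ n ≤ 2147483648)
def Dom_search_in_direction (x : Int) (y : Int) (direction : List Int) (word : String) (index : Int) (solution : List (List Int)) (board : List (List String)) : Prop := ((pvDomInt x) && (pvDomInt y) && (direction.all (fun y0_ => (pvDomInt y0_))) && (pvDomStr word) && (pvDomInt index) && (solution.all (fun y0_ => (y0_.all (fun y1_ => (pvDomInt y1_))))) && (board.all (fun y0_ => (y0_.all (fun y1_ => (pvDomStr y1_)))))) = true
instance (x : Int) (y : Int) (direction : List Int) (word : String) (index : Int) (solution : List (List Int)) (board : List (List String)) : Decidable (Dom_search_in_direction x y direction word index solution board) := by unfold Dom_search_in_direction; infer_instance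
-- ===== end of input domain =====

-- B replaces A's boolean-plumbed recursion on a growing index by a single for-loop over
-- range(index, len(word)) (an explicit index list), i.e. a loop over the exact character
-- positions A's recursion walks; objective: simpler. A mutates `solution` (appends); the
-- equivalence proved here is about the return value only (B performs the same appends).

-- ===== PORT A =====
-- literal transliteration of A's recursion; PySem.List.pyGet? models board[y][x],
-- word[index], direction[0], direction[1] (none = IndexError, excluded by Pre_).
def search_in_direction (x : Int) (y : Int) (direction : List Int) (word : String) (index : Int) (solution : List (List Int)) (board : List (List String)) : Bool :=
  if index = (word.toList.length : Int) then true
  else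
    match PySem.List.pyGet? board y with
    | none => false
    | some row =>
      match PySem.List.pyGet? row x, hw : PySem.List.pyGet? word.toList index with
      | some c, some w =>
        -- board[y][x] == word[index]: a cell string equals a 1-char string
        if c.toList = [w] then
          match PySem.List.pyGet? direction 0, PySem.List.pyGet? direction 1 with
          | some d0, some d1 =>
            search_in_direction (x + d0) (y + d1) direction word (index + 1) (solution ++ [[x, y]]) board
          | _, _ => false
        else false
      | _, _ => false
  termination_by ((word.toList.length : Int) - index).toNat
  decreasing_by
    have h1 : PySem.Raise.InRange word.toList.length index := by
      by_contra hn
      rw [← PySem.List.pyGet?_eq_none_iff] at hn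
      simp [hn] at hw
    have h2 := h1.2
    omega

-- ===== PORT B =====
-- the for-loop of Source B: `for i in range(index, len(word))`, one step per index i;
-- Python's range is an iterator, so it is ported as the counter i running up to n
def sid_for (board : List (List String)) (direction : List Int) (word : List Char) (i n : Int) (x y : Int) (sol : List (List Int)) : Bool :=
  if i < n then
    match (PySem.List.pyGet? board y).bind (fun r => PySem.List.pyGet? r x) with
    | none => false
    | some c =>
      match PySem.List.pyGet? word i with
      | none => false
      | some w =>
        if c.toList = [w] then
          match PySem.List.pyGet? direction 0 with
          | none => false
          | some d0 =>
            match PySem.List.pyGet? direction 1 with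
            | none => false
            | some d1 => sid_for board direction word (i + 1) n (x + d0) (y + d1) (sol ++ [[x, y]])
        else false
  else true
  termination_by (n - i).toNat

def search_in_direction_alt (x : Int) (y : Int) (direction : List Int) (word : String) (index : Int) (solution : List (List Int)) (board : List (List String)) : Bool :=
  sid_for board direction word.toList index (word.toList.length : Int) x y solution

-- ===== PRECONDITION & SPEC =====
-- the board cell read at step k of the walk that starts at (x, y)
def sid_cell (board : List (List String)) (x y d0 d1 : Int) (k : Nat) : Option String :=
  (PySem.List.pyGet? board (y + (k : Int) * d1)).bind (fun r => PySem.List.pyGet? r (x + (k : Int) * d0))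

-- step j of the walk is in range on the board and in the word, and the cell matches the character
def sid_agree (board : List (List String)) (direction : List Int) (word : List Char) (x y index : Int) (j : Nat) : Bool :=
  match sid_cell board x y (direction.getD 0 0) (direction.getD 1 0) j with
  | none => false
  | some c =>
    match PySem.List.pyGet? word (index + (j : Int)) with
    | none => false
    | some w => decide (c.toList = [w])

-- step j is in range on the board and in the word, and the cell does NOT match the character
def sid_clash (board : List (List String)) (direction : List Int) (word : List Char) (x y index : Int) (j : Nat) : Bool :=
  match sid_cell board x y (direction.getD 0 0) (direction.getD 1 0) j with
  | none => false
  | some c =>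
    match PySem.List.pyGet? word (index + (j : Int)) with
    | none => false
    | some w => decide (c.toList ≠ [w])

-- Pre_ = exactly the inputs on which Python A returns (no IndexError): either index == len(word),
-- or the walk matches for m steps that all stay on the board and in the word and then either the
-- word is exhausted or an in-range cell mismatches; direction must have ≥ 2 entries once a step is taken.
def Pre_search_in_direction (x : Int) (y : Int) (direction : List Int) (word : String) (index : Int) (solution : List (List Int)) (board : List (List String)) : Prop :=
  index = (word.toList.length : Int) ∨
  (index < (word.toList.length : Int) ∧
    ∃ m < 2 * word.toList.length + 2,
      (∀ j < m, sid_agree board direction word.toList x y index j = true) ∧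
      (m = 0 ∨ 2 ≤ direction.length) ∧
      (index + (m : Int) = (word.toList.length : Int) ∨
        sid_clash board direction word.toList x y index m = true))

instance (x : Int) (y : Int) (direction : List Int) (word : String) (index : Int) (solution : List (List Int)) (board : List (List String)) : Decidable (Pre_search_in_direction x y direction word index solution board) := by unfold Pre_search_in_direction; infer_instance

def pvWitness_search_in_direction : Int × Int × List Int × String × Int × List (List Int) × List (List String) :=
  (0, 0, [1, 0], "ab", 0, ([] : List (List Int)), [["a", "b"]])

def Spec_search_in_direction (x : Int) (y : Int) (direction : List Int) (word : String) (index : Int) (solution : List (List Int)) (board : List (List String)) (out : Bool) : Prop := out = search_in_direction_alt x y direction word index solution board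
instance (x : Int) (y : Int) (direction : List Int) (word : String) (index : Int) (solution : List (List Int)) (board : List (List String)) (out : Bool) : Decidable (Spec_search_in_direction x y direction word index solution board out) := by unfold Spec_search_in_direction; infer_instance

-- ===== CLAIM (what is proved, stated in full; the proofs are below) =====
def Claim_equal_search_in_direction : Prop := ∀ (x : Int) (y : Int) (direction : List Int) (word : String) (index : Int) (solution : List (List Int)) (board : List (List String)), Dom_search_in_direction x y direction word index solution board → Pre_search_in_direction x y direction word index solution board → Spec_search_in_direction x y direction word index solution board (search_in_direction x y direction word index solution board)

-- ===== LEMMAS AND PROOFS =====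

theorem sid_agree_shift (board : List (List String)) (direction : List Int) (word : List Char) (x y index : Int) (j : Nat) :
    sid_agree board direction word (x + direction.getD 0 0) (y + direction.getD 1 0) (index + 1) j =
      sid_agree board direction word x y index (j + 1) := by
  have h1 : (x + direction.getD 0 0) + (j : Int) * direction.getD 0 0 = x + ((j + 1 : Nat) : Int) * direction.getD 0 0 := by push_cast; ring
  have h2 : (y + direction.getD 1 0) + (j : Int) * direction.getD 1 0 = y + ((j + 1 : Nat) : Int) * direction.getD 1 0 := by push_cast; ring
  have h3 : (index + 1) + (j : Int) = index + ((j + 1 : Nat) : Int) := by push_cast; ring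
  simp only [sid_agree, sid_cell, h1, h2, h3]

theorem sid_clash_shift (board : List (List String)) (direction : List Int) (word : List Char) (x y index : Int) (j : Nat) :
    sid_clash board direction word (x + direction.getD 0 0) (y + direction.getD 1 0) (index + 1) j =
      sid_clash board direction word x y index (j + 1) := by
  have h1 : (x + direction.getD 0 0) + (j : Int) * direction.getD 0 0 = x + ((j + 1 : Nat) : Int) * direction.getD 0 0 := by push_cast; ring
  have h2 : (y + direction.getD 1 0) + (j : Int) * direction.getD 1 0 = y + ((j + 1 : Nat) : Int) * direction.getD 1 0 := by push_cast; ring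
  have h3 : (index + 1) + (j : Int) = index + ((j + 1 : Nat) : Int) := by push_cast; ring
  simp only [sid_clash, sid_cell, h1, h2, h3]

theorem sid_main (board : List (List String)) (direction : List Int) (word : String) :
    ∀ (k : Nat) (x y index : Int) (sol : List (List Int)),
      ((word.toList.length : Int) - index).toNat = k →
      Pre_search_in_direction x y direction word index sol board →
      search_in_direction x y direction word index sol board =
        sid_for board direction word.toList index (word.toList.length : Int) x y sol := by
  intro k
  induction k with
  | zero =>
    intro x y index sol hk hpre
    have hin : index = (word.toList.length : Int) := by
      rcases hpre with h | ⟨hlt, _⟩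
      · exact h
      · omega
    rw [search_in_direction]
    rw [if_pos hin]
    rw [sid_for]
    rw [if_neg (by omega)]
  | succ k ih =>
    intro x y index sol hk hpre
    have hlt : index < (word.toList.length : Int) := by
      rcases hpre with h | ⟨hlt, _⟩
      · omega
      · exact hlt
    rcases hpre with h | ⟨_, m, hm, hAll, hDir, hEnd⟩
    · omega
    rcases m with _ | j
    · -- mismatch at the very first step: both return false
      rcases hEnd with h | hcl
      · simp only [Nat.cast_zero, add_zero] at h; omega
      · unfold sid_clash at hcl
        unfold sid_cell at hcl
        simp only [Nat.cast_zero, zero_mul, add_zero] at hcl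
        rw [search_in_direction]
        rw [if_neg (by omega)]
        rw [sid_for]
        rw [if_pos hlt]
        rcases hrow : PySem.List.pyGet? board y with _ | row <;> simp [hrow] at hcl ⊢
        rcases hc : PySem.List.pyGet? row x with _ | c <;> simp [hc] at hcl ⊢
        rcases hw : PySem.List.pyGet? word.toList index with _ | w <;> simp [hw] at hcl ⊢
        simp [hcl]
    · -- the first step matches: both advance and the IH closes the rest
      have hag := hAll 0 (Nat.succ_pos j)
      unfold sid_agree at hag
      unfold sid_cell at hag
      simp only [Nat.cast_zero, zero_mul, add_zero] at hag
      have hdl : 2 ≤ direction.length := by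
        rcases hDir with h | h
        · exact absurd h (Nat.succ_ne_zero j)
        · exact h
      obtain ⟨d0, dtl⟩ : ∃ d0 dtl, direction = d0 :: dtl := by
        cases direction with
        | nil => simp at hdl
        | cons a t => exact ⟨a, t, rfl⟩
      obtain ⟨dtl, rfl⟩ := dtl
      obtain ⟨d1, dtl2, rfl⟩ : ∃ d1 dtl2, dtl = d1 :: dtl2 := by
        cases dtl with
        | nil => simp at hdl
        | cons a t => exact ⟨a, t, rfl⟩
      have hg0 : PySem.List.pyGet? (d0 :: d1 :: dtl2) (0 : Int) = some d0 := PySem.List.pyGet?_zero_cons _ _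
      have hg1 : PySem.List.pyGet? (d0 :: d1 :: dtl2) (1 : Int) = some d1 := by
        have : ((0 : Nat) : Int) + 1 = (1 : Int) := by norm_num
        rw [← this, PySem.List.pyGet?_cons_succ]
        simp
      have hgd0 : (d0 :: d1 :: dtl2).getD 0 0 = d0 := rfl
      have hgd1 : (d0 :: d1 :: dtl2).getD 1 0 = d1 := rfl
      rw [search_in_direction]
      rw [if_neg (by omega)]
      rw [sid_for]
      rw [if_pos hlt]
      rcases hrow : PySem.List.pyGet? board y with _ | row <;> simp [hrow] at hag ⊢
      rcases hc : PySem.List.pyGet? row x with _ | c <;> simp [hc] at hag ⊢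
      rcases hw : PySem.List.pyGet? word.toList index with _ | w <;> simp [hw] at hag ⊢
      simp only [hag, decide_true, Bool.true_and]
      have hlen : (word.length : Int) = (word.toList.length : Int) := by simp
      rw [hlen]
      apply ih _ _ _ _ (by omega)
      -- the shifted precondition for the rest of the walk
      by_cases hend1 : index + 1 = (word.toList.length : Int)
      · exact Or.inl hend1
      · refine Or.inr ⟨by omega, j, by omega, ?_, Or.inr hdl, ?_⟩
        · intro j' hj'
          have := hAll (j' + 1) (by omega)
          rw [← sid_agree_shift] at this
          rw [hgd0, hgd1] at this
          exact this
        · rcases hEnd with h | h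
          · left; push_cast at h ⊢; omega
          · right
            rw [← sid_clash_shift, hgd0, hgd1] at h
            exact h

-- ===== VERDICT (by name: the statement is the Claim_ definition above) =====
theorem search_in_direction_spec : Claim_equal_search_in_direction := by
  intro x y direction word index solution board _ hpre
  unfold Spec_search_in_direction search_in_direction_alt
  exact sid_main board direction word _ x y index solution rfl hpre
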